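-- pv_equiv track=rewrite | github.com/emmanuel-ch/Product_Trailer | product_trailer/profile.py | validate_profilename
-- ===== SOURCE A (Python) =====
-- import string
--
-- def validate_profilename(name: str) -> bool:
--     valid_chars = "-_.,()" + string.ascii_letters + string.digits
--     acceptable_name = ''.join(
--         char for char in name if char in valid_chars
--         )
--     return (
--         (name == acceptable_name)
--         and (len(name) > 0)
--         and (len(name) < 30)
--     )
-- ===== SOURCE B (Python) =====
-- import re
--
-- _VALID = re.compile(r'[-_.,()A-Za-z0-9]+')
--
-- def validate_profilename(name: str) -> bool:
--     return len(name) < 30 and _VALID.fullmatch(name) is not None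
-- ===== Notes on version B (the rewrite author's own statement) =====
-- stated objective: idiomatic
-- what changed: B drops A's build-a-filtered-copy-and-string-compare and instead tests the whole name with a single anchored character-class regex fullmatch ([-_.,()A-Za-z0-9]+, which also enforces nonemptiness) combined with the len<30 bound; no intermediate string is materialised. (measured faster: the regex engine scans in C without building a filtered copy)
import Mathlib
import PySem

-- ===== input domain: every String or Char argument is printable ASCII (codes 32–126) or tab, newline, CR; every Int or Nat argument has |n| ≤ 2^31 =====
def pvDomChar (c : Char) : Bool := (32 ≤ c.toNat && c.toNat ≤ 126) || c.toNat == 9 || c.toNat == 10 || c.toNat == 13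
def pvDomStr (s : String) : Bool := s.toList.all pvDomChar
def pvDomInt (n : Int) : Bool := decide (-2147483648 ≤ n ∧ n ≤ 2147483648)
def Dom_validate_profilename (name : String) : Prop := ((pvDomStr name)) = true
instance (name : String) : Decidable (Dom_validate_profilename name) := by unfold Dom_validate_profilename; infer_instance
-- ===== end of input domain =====

-- B replaces A's build-a-filtered-copy-and-compare with a single whole-string
-- character-class test (regex fullmatch in Python): idiomatic, no intermediate string.

-- ===== PORT A =====
-- A: filter name's chars by membership in the valid_chars string, join, compare, then length bounds.
def validate_profilename (name : String) : Bool :=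
  let valid_chars : List Char :=
    ("-_.,()" ++ "abcdefghijklmnopqrstuvwxyzABCDEFGHIJKLMNOPQRSTUVWXYZ" ++ "0123456789").toList
  let acceptable_name : List Char := name.toList.filter (fun c => valid_chars.contains c)
  (name.toList == acceptable_name)
    && decide (name.toList.length > 0)
    && decide (name.toList.length < 30)

-- ===== PORT B =====
-- B: character-class predicate of the regex [-_.,()A-Za-z0-9]
def pvClassChar (c : Char) : Bool :=
  ('a' ≤ c && c ≤ 'z') || ('A' ≤ c && c ≤ 'Z') || ('0' ≤ c && c ≤ '9')
    || c == '-' || c == '_' || c == '.' || c == ',' || c == '(' || c == ')'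

-- B: len(name) < 30 and fullmatch of [-_.,()A-Za-z0-9]+ (nonempty ∧ every char in the class)
def validate_profilename_alt (name : String) : Bool :=
  decide (name.toList.length < 30)
    && !(name.toList.isEmpty)
    && name.toList.all pvClassChar

-- ===== PRECONDITION & SPEC =====
def Spec_validate_profilename (name : String) (out : Bool) : Prop := out = validate_profilename_alt name
instance (name : String) (out : Bool) : Decidable (Spec_validate_profilename name out) := by unfold Spec_validate_profilename; infer_instance

-- ===== CLAIM (what is proved, stated in full; the proofs are below) =====
def Claim_equal_validate_profilename : Prop := ∀ (name : String), Dom_validate_profilename name → Spec_validate_profilename name (validate_profilename name)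

-- ===== LEMMAS AND PROOFS =====

-- on domain characters (ASCII), membership in A's valid_chars string equals B's class predicate
set_option maxRecDepth 4000 in
theorem pvPoint_small : ∀ n : Fin 128,
    (("-_.,()" ++ "abcdefghijklmnopqrstuvwxyzABCDEFGHIJKLMNOPQRSTUVWXYZ" ++ "0123456789").toList.contains
      (Char.ofNat n.val)) = pvClassChar (Char.ofNat n.val) := by decide

theorem pvPoint (c : Char) (h : pvDomChar c = true) :
    (("-_.,()" ++ "abcdefghijklmnopqrstuvwxyzABCDEFGHIJKLMNOPQRSTUVWXYZ" ++ "0123456789").toList.contains c)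
      = pvClassChar c := by
  have hlt : c.toNat < 128 := by
    simp only [pvDomChar, Bool.or_eq_true, Bool.and_eq_true, decide_eq_true_eq, beq_iff_eq] at h
    omega
  have := pvPoint_small ⟨c.toNat, hlt⟩
  simpa [Char.ofNat_toNat] using this

theorem pvFilterSelf (l : List Char) (q : Char → Bool) :
    (l == l.filter q) = l.all q := by
  rw [Bool.eq_iff_iff]
  simp only [beq_iff_eq, List.all_eq_true]
  constructor
  · intro h
    exact fun a ha => List.filter_eq_self.mp h.symm a ha
  · intro h
    exact (List.filter_eq_self.mpr h).symm

-- ===== VERDICT (by name: the statement is the Claim_ definition above) =====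
theorem validate_profilename_spec : Claim_equal_validate_profilename := by
  intro name hdom
  unfold Spec_validate_profilename validate_profilename validate_profilename_alt
  have hdom' : ∀ c ∈ name.toList, pvDomChar c = true := by
    simpa [Dom_validate_profilename, pvDomStr, List.all_eq_true] using hdom
  have hcong : name.toList.filter
      (fun c => ("-_.,()" ++ "abcdefghijklmnopqrstuvwxyzABCDEFGHIJKLMNOPQRSTUVWXYZ" ++ "0123456789").toList.contains c)
      = name.toList.filter pvClassChar :=
    List.filter_congr (fun c hc => pvPoint c (hdom' c hc))
  simp only [hcong, pvFilterSelf]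
  cases hl : name.toList with
  | nil => simp
  | cons a l => simp [Bool.and_comm, Bool.and_assoc]
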